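-- pv_equiv track=rewrite | github.com/algo-1/aqua-challenge | dice.py | reorder_dict
-- ===== SOURCE A (Python) =====
-- from typing import List, Dict, Tuple
--
-- dir_map: Dict[int, List[Tuple[str, str]]] = {
--     0 : [("F", "R"), ("L", "F"), ("B", "L"), ("R", "B"), ("T", "T"), ("BT", "BT")],
--     1 : [("F", "BT"), ("T", "F"), ("B", "T"), ("BT", "B"), ("L", "L"), ("R", "R")]
-- }
--
-- def reorder_dict(die_map: Dict[str, int], _T: str,  trans: Dict[str, int]) -> dict:
--     if _T == "L":
--         for x,y in dir_map[0]:
--             trans[x] = die_map[y]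
--     elif _T == "R":
--         for x,y in dir_map[0]:
--             trans[y] = die_map[x]
--     elif _T == "U":
--         for x,y in dir_map[1]:
--             trans[x] = die_map[y]
--     elif _T == "D":
--         for x,y in dir_map[1]:
--             trans[y] = die_map[x]
--
--     return trans
-- ===== SOURCE B (Python) =====
-- # B: cycle-rotation formulation. Each direction is a rotation about an axis:
-- # a 4-cycle of faces plus two fixed faces. Instead of per-direction pair
-- # tables, index into the cycle with modular arithmetic (inverse rotations
-- # walk the cycle backwards), then copy the two fixed faces.
-- AXIS = {"L": 0, "R": 0, "U": 1, "D": 1}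
--
-- def reorder_dict(die_map, _T, trans):
--     axis = AXIS.get(_T)
--     if axis is None:
--         return trans
--     if axis == 0:
--         cycle, fixed = ["F", "L", "B", "R"], ["T", "BT"]
--     else:
--         cycle, fixed = ["F", "T", "B", "BT"], ["L", "R"]
--     inv = _T in ("R", "D")
--     off, step = (3, 1) if inv else (0, 3)
--     for i in range(4):
--         j = (i + off) % 4
--         trans[cycle[j]] = die_map[cycle[(j + step) % 4]]
--     for k in fixed:
--         trans[k] = die_map[k]
--     return trans
-- ===== Notes on version B (the rewrite author's own statement) =====
-- stated objective: alternative
-- what changed: Replaced the four-way branch over explicit (target,source) pair tables by a cycle-rotation formulation: pick the 4-cycle of faces for the rotation axis plus its two fixed faces, walk the cycle with modular index arithmetic (backwards for the inverse directions), then copy the fixed faces.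
import Mathlib
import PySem

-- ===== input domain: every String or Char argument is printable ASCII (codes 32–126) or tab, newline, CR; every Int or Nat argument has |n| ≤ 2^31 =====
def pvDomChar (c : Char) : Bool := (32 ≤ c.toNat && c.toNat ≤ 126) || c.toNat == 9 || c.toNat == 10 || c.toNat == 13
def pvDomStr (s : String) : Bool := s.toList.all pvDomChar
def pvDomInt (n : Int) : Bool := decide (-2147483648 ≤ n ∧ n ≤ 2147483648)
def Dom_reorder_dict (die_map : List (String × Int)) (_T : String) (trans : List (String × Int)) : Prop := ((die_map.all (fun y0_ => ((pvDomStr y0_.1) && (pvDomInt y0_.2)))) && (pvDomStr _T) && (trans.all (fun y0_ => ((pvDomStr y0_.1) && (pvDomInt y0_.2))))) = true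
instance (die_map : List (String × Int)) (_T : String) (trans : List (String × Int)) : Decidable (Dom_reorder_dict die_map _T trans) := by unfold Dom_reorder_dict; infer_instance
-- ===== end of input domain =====

-- B replaces A's four per-direction (target,source) pair tables by a cycle-rotation formulation
-- (4-cycle walked with modular index arithmetic, plus two fixed faces); return values are equal
-- (both Pythons also mutate `trans` identically).

-- ===== PORT A =====
def dirMap0 : List (String × String) :=
  [("F", "R"), ("L", "F"), ("B", "L"), ("R", "B"), ("T", "T"), ("BT", "BT")]
def dirMap1 : List (String × String) :=
  [("F", "BT"), ("T", "F"), ("B", "T"), ("BT", "B"), ("L", "L"), ("R", "R")]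

-- die_map[y] raises KeyError when y is missing; Pre_ guarantees the six keys, so getD is exact there.
def reorder_dict (die_map : List (String × Int)) (_T : String) (trans : List (String × Int)) : List (String × Int) :=
  if _T == "L" then
    (dirMap0.foldl (fun tr (p : String × String) =>
      PySem.Dict.insert tr p.1 (PySem.Dict.getD (PySem.Dict.mk die_map) p.2 0)) (PySem.Dict.mk trans)).items
  else if _T == "R" then
    (dirMap0.foldl (fun tr (p : String × String) =>
      PySem.Dict.insert tr p.2 (PySem.Dict.getD (PySem.Dict.mk die_map) p.1 0)) (PySem.Dict.mk trans)).items
  else if _T == "U" then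
    (dirMap1.foldl (fun tr (p : String × String) =>
      PySem.Dict.insert tr p.1 (PySem.Dict.getD (PySem.Dict.mk die_map) p.2 0)) (PySem.Dict.mk trans)).items
  else if _T == "D" then
    (dirMap1.foldl (fun tr (p : String × String) =>
      PySem.Dict.insert tr p.2 (PySem.Dict.getD (PySem.Dict.mk die_map) p.1 0)) (PySem.Dict.mk trans)).items
  else trans

-- ===== PORT B =====
def axisTable : PySem.Dict String Int :=
  PySem.Dict.mk [("L", 0), ("R", 0), ("U", 1), ("D", 1)]

-- cycle[j] for j = (i + off) % 4 is always in range, so `.getD ""` is exact;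
-- die_map[...] raises KeyError when the key is missing — Pre_ guarantees the six keys.
def reorder_dict_alt (die_map : List (String × Int)) (_T : String) (trans : List (String × Int)) : List (String × Int) :=
  match PySem.Dict.get? axisTable _T with
  | none => trans
  | some axis =>
    let cf : List String × List String :=
      if axis == 0 then (["F", "L", "B", "R"], ["T", "BT"]) else (["F", "T", "B", "BT"], ["L", "R"])
    let cycle := cf.1
    let fixed := cf.2
    let inv : Bool := _T == "R" || _T == "D"
    let os : Int × Int := if inv then (3, 1) else (0, 3)
    let d := PySem.Dict.mk die_map
    let tr := (PySem.List.pyRange 0 4 1).foldl (fun tr i =>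
        let j := PySem.Int.mod (i + os.1) 4
        PySem.Dict.insert tr ((PySem.List.pyGet? cycle j).getD "")
          (PySem.Dict.getD d ((PySem.List.pyGet? cycle (PySem.Int.mod (j + os.2) 4)).getD "") 0))
      (PySem.Dict.mk trans)
    let tr := fixed.foldl (fun tr k => PySem.Dict.insert tr k (PySem.Dict.getD d k 0)) tr
    tr.items

-- ===== PRECONDITION & SPEC =====
-- Pre_ excludes exactly the inputs where Python A raises KeyError: a direction in {L,R,U,D}
-- with any of the six face keys missing from die_map.
def Pre_reorder_dict (die_map : List (String × Int)) (_T : String) (trans : List (String × Int)) : Prop :=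
  (_T = "L" ∨ _T = "R" ∨ _T = "U" ∨ _T = "D") →
    (∀ k ∈ ["F", "L", "B", "R", "T", "BT"], PySem.Dict.contains (PySem.Dict.mk die_map) k = true)
instance (die_map : List (String × Int)) (_T : String) (trans : List (String × Int)) : Decidable (Pre_reorder_dict die_map _T trans) := by unfold Pre_reorder_dict; infer_instance

def pvWitness_reorder_dict : (List (String × Int)) × String × (List (String × Int)) :=
  ([("F", 1), ("L", 2), ("B", 3), ("R", 4), ("T", 5), ("BT", 6)], "R", [("T", 9)])

def Spec_reorder_dict (die_map : List (String × Int)) (_T : String) (trans : List (String × Int)) (out : List (String × Int)) : Prop := out = reorder_dict_alt die_map _T trans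
instance (die_map : List (String × Int)) (_T : String) (trans : List (String × Int)) (out : List (String × Int)) : Decidable (Spec_reorder_dict die_map _T trans out) := by unfold Spec_reorder_dict; infer_instance

-- ===== CLAIM =====
def Claim_equal_reorder_dict : Prop := ∀ (die_map : List (String × Int)) (_T : String) (trans : List (String × Int)), Dom_reorder_dict die_map _T trans → Pre_reorder_dict die_map _T trans → Spec_reorder_dict die_map _T trans (reorder_dict die_map _T trans)

-- ===== LEMMAS AND PROOFS =====

-- ===== VERDICT =====
theorem reorder_dict_spec : Claim_equal_reorder_dict := by
  intro die_map _T trans _ _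
  unfold Spec_reorder_dict reorder_dict reorder_dict_alt
  by_cases hL : _T = "L"
  · subst hL; rfl
  · by_cases hR : _T = "R"
    · subst hR; rfl
    · by_cases hU : _T = "U"
      · subst hU; rfl
      · by_cases hD : _T = "D"
        · subst hD; rfl
        · simp only [beq_iff_eq, hL, hR, hU, hD, if_false]
          have : PySem.Dict.get? axisTable _T = none := by
            simp [axisTable, beq_iff_eq, Ne.symm hL, Ne.symm hR, Ne.symm hU, Ne.symm hD, PySem.Dict.get?]
          rw [this]
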